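-- pv_equiv track=rewrite | github.com/esbmc/esbmc-python-cpp | regressions/int_bit_length.py | bit_length
-- ===== SOURCE A (Python) =====
-- def bit_length(x: int) -> int:
--     """Returns the number of bits required to represent x in binary."""
--     if x == 0:
--         return 0
--     length = 0
--     while x > 0:
--         length += 1
--         x >>= 1
--     return length
-- ===== SOURCE B (Python) =====
-- def bit_length(x: int) -> int:
--     """Returns the number of bits required to represent x in binary."""
--     if x <= 0:
--         return 0
--     return len(bin(x)) - 2
-- ===== Notes on version B (the rewrite author's own statement) =====
-- stated objective: idiomatic
-- what changed: Replaces the shift-and-count loop with the standard-library idiom len(bin(x)) - 2, materializing the binary representation once and measuring its length; a single x <= 0 guard covers zero and negatives.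
import Mathlib
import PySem

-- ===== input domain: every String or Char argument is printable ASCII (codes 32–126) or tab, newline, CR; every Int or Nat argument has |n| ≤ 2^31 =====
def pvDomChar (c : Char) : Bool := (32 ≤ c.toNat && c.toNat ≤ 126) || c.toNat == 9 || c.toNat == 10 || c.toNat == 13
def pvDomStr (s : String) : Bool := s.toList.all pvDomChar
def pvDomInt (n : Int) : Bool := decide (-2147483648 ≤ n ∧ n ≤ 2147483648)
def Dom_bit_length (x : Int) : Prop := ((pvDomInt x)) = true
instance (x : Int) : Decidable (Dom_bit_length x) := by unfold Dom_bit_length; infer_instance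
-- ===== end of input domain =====

-- B replaces A's shift-and-count loop with the idiom len(bin(x)) - 2 (measure the
-- materialized binary representation), guarded by x <= 0 -> 0; return values proved equal.

-- ===== PORT A =====
-- 'while x > 0: length += 1; x >>= 1' — x >> 1 on a nonneg int is floor division by 2
def bitLenLoop (x : Int) (length : Int) : Int :=
  if h : x > 0 then
    bitLenLoop (PySem.Int.floordiv x 2) (length + 1)
  else
    length
termination_by x.toNat
decreasing_by
  have h2 : PySem.Int.floordiv x 2 = x / 2 := PySem.Int.floordiv_eq_ediv_of_pos (by omega)
  rw [h2]
  omega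

def bit_length (x : Int) : Int :=
  if x = 0 then 0
  else bitLenLoop x 0

-- ===== PORT B =====
-- bin(x) for x > 0 is "0b" followed by the binary digits; len(bin(x)) - 2 is the
-- number of digit characters. binChars builds exactly that digit list (most
-- significant first), as CPython's bin does.
def binChars : Nat → List Char
  | 0 => []
  | n + 1 => binChars ((n + 1) / 2) ++ [if (n + 1) % 2 = 1 then '1' else '0']
decreasing_by omega

def bit_length_alt (x : Int) : Int :=
  if x ≤ 0 then 0
  else ((binChars x.toNat).length : Int)

-- ===== PRECONDITION & SPEC =====
def Spec_bit_length (x : Int) (out : Int) : Prop := out = bit_length_alt x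
instance (x : Int) (out : Int) : Decidable (Spec_bit_length x out) := by unfold Spec_bit_length; infer_instance

-- ===== CLAIM (what is proved, stated in full; the proofs are below) =====
def Claim_equal_bit_length : Prop := ∀ (x : Int), Dom_bit_length x → Spec_bit_length x (bit_length x)

-- ===== LEMMAS AND PROOFS =====
theorem bitLenLoop_eq (n : Nat) : ∀ (L : Int), bitLenLoop (n : Int) L = L + (binChars n).length := by
  induction n using Nat.strong_induction_on with
  | _ n ih =>
    intro L
    match n with
    | 0 => rw [bitLenLoop, binChars]; simp
    | m + 1 =>
      rw [bitLenLoop, binChars]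
      have hpos : ((m + 1 : Nat) : Int) > 0 := by positivity
      rw [dif_pos hpos]
      have hf : PySem.Int.floordiv ((m + 1 : Nat) : Int) 2 = (((m + 1) / 2 : Nat) : Int) := by
        exact_mod_cast PySem.Int.floordiv_natCast (m + 1) 2
      rw [hf, ih ((m + 1) / 2) (by omega)]
      simp
      omega

theorem bitLenLoop_nonpos (x : Int) (L : Int) (h : ¬ x > 0) : bitLenLoop x L = L := by
  rw [bitLenLoop, dif_neg h]

-- ===== VERDICT (by name: the statement is the Claim_ definition above) =====
theorem bit_length_spec : Claim_equal_bit_length := by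
  intro x _
  unfold Spec_bit_length bit_length bit_length_alt
  by_cases hx : x > 0
  · rw [if_neg (by omega), if_neg (by omega)]
    have hx' : ((x.toNat : Nat) : Int) = x := Int.toNat_of_nonneg (by omega)
    calc bitLenLoop x 0 = bitLenLoop ((x.toNat : Nat) : Int) 0 := by rw [hx']
    _ = 0 + (binChars x.toNat).length := bitLenLoop_eq x.toNat 0
    _ = ((binChars x.toNat).length : Int) := by omega
  · by_cases h0 : x = 0
    · simp [h0]
    · rw [if_neg h0, if_pos (by omega), bitLenLoop_nonpos x 0 hx]
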